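-- pv_equiv track=rewrite | github.com/Ostitter-Anondo/220-Lab-Homework | Lab05_20301474.py | pattern_a
-- ===== SOURCE A (Python) =====
-- def pattern_a(n, m=0):  # as the question did not specifically forbid me from using a second value,
--     if n == 0:          # I used a second value at my own discretion
--         return ""       # and based its use on what I learned in the past
--     else:
--         tex = ""
--         for i in range(n):
--             tex += str(i + 1) + " "
--         n -= 1
--         tex = 2 * m * " " + tex + "\n"
--         m += 1
--         return pattern_a(n, m) + tex
-- ===== SOURCE B (Python) =====
-- def pattern_a(n, m=0):
--     lines = []
--     for k in range(1, n + 1):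
--         content = "".join(str(i + 1) + " " for i in range(k))
--         lines.append(" " * (2 * (m + n - k)) + content + "\n")
--     return "".join(lines)
-- ===== Notes on version B (the rewrite author's own statement) =====
-- stated objective: faster
-- what changed: Replaces the bottom-up recursion (which re-copies the whole accumulated string at every level and builds each line by repeated += concatenation) with a single top-to-bottom loop that emits each line k=1..n with indentation 2*(m+n-k) into a list joined once at the end.
import Mathlib
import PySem

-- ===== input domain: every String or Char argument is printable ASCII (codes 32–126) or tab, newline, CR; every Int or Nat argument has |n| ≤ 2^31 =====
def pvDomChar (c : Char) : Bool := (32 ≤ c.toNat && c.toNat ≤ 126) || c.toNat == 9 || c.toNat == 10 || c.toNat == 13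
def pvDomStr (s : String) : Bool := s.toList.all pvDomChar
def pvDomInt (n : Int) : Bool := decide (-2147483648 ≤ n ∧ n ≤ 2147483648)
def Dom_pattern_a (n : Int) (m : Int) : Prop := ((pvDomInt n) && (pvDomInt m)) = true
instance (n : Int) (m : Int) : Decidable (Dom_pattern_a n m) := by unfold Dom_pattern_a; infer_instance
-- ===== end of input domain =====

-- B replaces A's bottom-up recursion (whole-string re-concatenation each level) with one top-to-bottom loop joined once; a timing run measured B faster at the larger sizes.

-- ===== PORT A =====
-- A's recursion decreases n by 1 each call down to the n == 0 base; for n ≥ 0 the fuel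
-- n.toNat is exactly the recursion depth, so this is a step-for-step transliteration there
-- (for n < 0 Python raises RecursionError; such inputs are excluded by Pre_pattern_a).
-- Strings are built on the List Char side (PySem convention) and wrapped with String.ofList.
def pattern_aFuel : Nat → Int → Int → List Char
  | 0, _, _ => []
  | fuel + 1, n, m =>
    if n = 0 then []
    else
      -- tex = ""; for i in range(n): tex += str(i+1) + " "
      let tex := (PySem.List.pyRange 0 n 1).foldl
        (fun t i => t ++ (PySem.Int.toChars (i + 1) ++ [' '])) []
      -- n -= 1; tex = 2*m*" " + tex + "\n"; m += 1
      let tex := PySem.List.pyRepeat [' '] (2 * m) ++ tex ++ ['\n']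
      pattern_aFuel fuel (n - 1) (m + 1) ++ tex

def pattern_a (n : Int) (m : Int) : String := String.ofList (pattern_aFuel n.toNat n m)

-- ===== PORT B =====
-- lines = []; for k in range(1, n+1): lines.append(...); return "".join(lines)
def pattern_a_alt (n : Int) (m : Int) : String :=
  String.ofList (PySem.Chars.join []
    ((PySem.List.pyRange 1 (n + 1) 1).map (fun k =>
      PySem.List.pyRepeat [' '] (2 * (m + n - k)) ++
      PySem.Chars.join [] ((PySem.List.pyRange 0 k 1).map
        (fun i => PySem.Int.toChars (i + 1) ++ [' '])) ++
      ['\n'])))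

-- ===== PRECONDITION & SPEC =====
-- For n < 0 Python's A never reaches the n == 0 base and raises RecursionError.
def Pre_pattern_a (n : Int) (m : Int) : Prop := 0 ≤ n
instance (n : Int) (m : Int) : Decidable (Pre_pattern_a n m) := by unfold Pre_pattern_a; infer_instance
def pvWitness_pattern_a : Int × Int := (3, 1)

def Spec_pattern_a (n : Int) (m : Int) (out : String) : Prop := out = pattern_a_alt n m
instance (n : Int) (m : Int) (out : String) : Decidable (Spec_pattern_a n m out) := by unfold Spec_pattern_a; infer_instance

-- ===== CLAIM (what is proved, stated in full; the proofs are below) =====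
def Claim_equal_pattern_a : Prop := ∀ (n : Int) (m : Int), Dom_pattern_a n m → Pre_pattern_a n m → Spec_pattern_a n m (pattern_a n m)

-- ===== LEMMAS AND PROOFS =====

-- join with empty separator is flatten
theorem pvJoinNilFlatten (l : List (List Char)) : PySem.Chars.join [] l = l.flatten := by
  simp only [PySem.Chars.join, List.intercalate]
  induction l with
  | nil => simp
  | cons a t ih =>
    cases t with
    | nil => simp
    | cons b u => simp_all [List.intersperse]

-- the inner content loop of A equals the joined comprehension of B
theorem pvFoldlAppend (h : Int → List Char) (l : List Int) (acc : List Char) :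
    l.foldl (fun t i => t ++ h i) acc = acc ++ (l.map h).flatten := by
  induction l generalizing acc with
  | nil => simp
  | cons x t ih => simp [ih, List.append_assoc]

-- B's value as a function of the invariant s = m + n
def pvF (s : Int) (n : Int) : List Char :=
  ((PySem.List.pyRange 1 (n + 1) 1).map (fun k =>
    PySem.List.pyRepeat [' '] (2 * (s - k)) ++
    PySem.Chars.join [] ((PySem.List.pyRange 0 k 1).map
      (fun i => PySem.Int.toChars (i + 1) ++ [' '])) ++
    ['\n'])).flatten

theorem pvAltEqF (n m : Int) :
    (pattern_a_alt n m).toList = pvF (m + n) n := by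
  simp [pattern_a_alt, pvF, pvJoinNilFlatten, String.toList_ofList]

theorem pvFStep (s n : Int) (hn : 1 ≤ n) :
    pvF s n = pvF s (n - 1) ++
      (PySem.List.pyRepeat [' '] (2 * (s - n)) ++
       PySem.Chars.join [] ((PySem.List.pyRange 0 n 1).map
         (fun i => PySem.Int.toChars (i + 1) ++ [' '])) ++
       ['\n']) := by
  unfold pvF
  have h1 : (n - 1) + 1 = n := by ring
  rw [h1]
  have h2 : PySem.List.pyRange 1 (n + 1) 1 = PySem.List.pyRange 1 n 1 ++ [n] :=
    PySem.List.pyRange_one_succ_right hn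
  rw [h2]
  simp

theorem pvMain : ∀ (fuel : Nat) (n m : Int), 0 ≤ n → n.toNat ≤ fuel →
    pattern_aFuel fuel n m = pvF (m + n) n := by
  intro fuel
  induction fuel with
  | zero =>
    intro n m hn hf
    have : n = 0 := by omega
    subst this
    simp [pattern_aFuel, pvF]
  | succ f ih =>
    intro n m hn hf
    by_cases h0 : n = 0
    · subst h0
      simp [pattern_aFuel, pvF]
    · have h1 : 1 ≤ n := by omega
      have hrec := ih (n - 1) (m + 1) (by omega) (by omega)
      have hms : (m + 1) + (n - 1) = m + n := by ring
      rw [hms] at hrec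
      simp only [pattern_aFuel, if_neg h0]
      rw [hrec, pvFStep (m + n) n h1]
      have hc : (PySem.List.pyRange 0 n 1).foldl
          (fun t i => t ++ (PySem.Int.toChars (i + 1) ++ [' '])) [] =
          PySem.Chars.join [] ((PySem.List.pyRange 0 n 1).map
            (fun i => PySem.Int.toChars (i + 1) ++ [' '])) := by
        rw [pvJoinNilFlatten, pvFoldlAppend]
        simp
      rw [hc]
      have hs : m + n - n = m := by ring
      simp [hs, List.append_assoc]

-- ===== VERDICT (by name: the statement is the Claim_ definition above) =====
theorem pattern_a_spec : Claim_equal_pattern_a := by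
  intro n m _ hpre
  unfold Spec_pattern_a pattern_a
  have h := pvMain n.toNat n m hpre (le_refl _)
  have h2 := pvAltEqF n m
  have h3 : pattern_a_alt n m = String.ofList (pvF (m + n) n) := by
    rw [← h2, String.ofList_toList]
  rw [h3, h]
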